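-- pv_equiv track=rewrite | github.com/Skod4/HotwheelsPDF | lightpdf/screens/split_screen.py | pages_to_range_str
-- ===== SOURCE A (Python) =====
-- def pages_to_range_str(pages):
--     """Convert a list of page numbers to a range string"""
--     if not pages:
--         return ""
--
--     ranges = []
--     start = end = pages[0]
--
--     for page in pages[1:]:
--         if page == end + 1:
--             end = page
--         else:
--             # Add the previous range
--             if start == end:
--                 ranges.append(str(start))
--             else:
--                 ranges.append(f"{start}-{end}")
--             start = end = page
--
--     # Add the last range
--     if start == end:
--         ranges.append(str(start))
--     else:
--         ranges.append(f"{start}-{end}")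
--
--     return ",".join(ranges)
-- ===== SOURCE B (Python) =====
-- def pages_to_range_str(pages):
--     """Convert a list of page numbers to a range string"""
--     if not pages:
--         return ""
--     # Boundary detection: a page STARTS a run iff it is the first page or not
--     # predecessor+1 of the page before it; it ENDS a run iff it is the last page
--     # or the next page is not its successor.  Starts and ends pair up positionally.
--     starts = [pages[0]] + [p for q, p in zip(pages, pages[1:]) if p != q + 1]
--     ends = [q for q, p in zip(pages, pages[1:]) if p != q + 1] + [pages[-1]]
--     return ",".join(str(s) if s == e else f"{s}-{e}" for s, e in zip(starts, ends))
-- ===== Notes on version B (the rewrite author's own statement) =====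
-- stated objective: alternative
-- what changed: B replaces A's stateful run-merging loop by boundary detection: it zips the list with its shifted self to extract the list of run starts and the list of run ends, then zips those positionally and renders each pair.
import Mathlib
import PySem

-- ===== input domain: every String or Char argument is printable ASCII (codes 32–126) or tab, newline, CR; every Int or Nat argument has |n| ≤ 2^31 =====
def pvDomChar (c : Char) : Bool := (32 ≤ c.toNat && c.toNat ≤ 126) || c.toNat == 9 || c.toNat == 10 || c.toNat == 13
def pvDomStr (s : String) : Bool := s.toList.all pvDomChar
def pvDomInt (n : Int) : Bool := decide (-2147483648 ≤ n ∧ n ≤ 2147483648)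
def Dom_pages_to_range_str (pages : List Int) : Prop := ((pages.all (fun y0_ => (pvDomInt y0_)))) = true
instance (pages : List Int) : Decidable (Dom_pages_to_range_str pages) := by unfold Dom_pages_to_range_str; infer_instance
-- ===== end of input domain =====

-- B replaces A's stateful run-merging loop by boundary detection over zipped shifted lists; objective: alternative algorithm, same cost.


-- ===== PORT A =====
-- A's loop over pages[1:], carrying (start, end, ranges); emits the string for a run when it closes.
def pagesLoopA : List Int → Int → Int → List String → List String
  | [], start, e, ranges =>
      ranges ++ [if start = e then PySem.Int.toStr start
                 else PySem.Int.toStr start ++ "-" ++ PySem.Int.toStr e]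
  | page :: rest, start, e, ranges =>
      if page = e + 1 then pagesLoopA rest start page ranges
      else pagesLoopA rest page page
        (ranges ++ [if start = e then PySem.Int.toStr start
                    else PySem.Int.toStr start ++ "-" ++ PySem.Int.toStr e])

def pages_to_range_str (pages : List Int) : String :=
  match pages with
  | [] => ""
  | p0 :: rest => PySem.Str.join "," (pagesLoopA rest p0 p0 [])

-- ===== PORT B =====
-- B: run starts = first page plus every p (from zip(pages, pages[1:])) with p ≠ q+1.
def pagesStartsB (pages : List Int) : List Int :=
  match pages with
  | [] => []
  | p0 :: rest =>
      p0 :: ((pages.zip rest).filterMap fun qp => if qp.2 = qp.1 + 1 then none else some qp.2)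

-- B: run ends = every q (from zip(pages, pages[1:])) with p ≠ q+1, plus the last page.
def pagesEndsB (pages : List Int) : List Int :=
  match pages with
  | [] => []
  | p0 :: rest =>
      ((pages.zip rest).filterMap fun qp => if qp.2 = qp.1 + 1 then none else some qp.1)
        ++ [List.getLastD rest p0]

-- B: render one (start, end) pair.
def pagesRenderB (g : Int × Int) : String :=
  if g.1 = g.2 then PySem.Int.toStr g.1
  else PySem.Int.toStr g.1 ++ "-" ++ PySem.Int.toStr g.2

def pages_to_range_str_alt (pages : List Int) : String :=
  match pages with
  | [] => ""
  | _ :: _ =>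
      PySem.Str.join "," (((pagesStartsB pages).zip (pagesEndsB pages)).map pagesRenderB)

-- ===== PRECONDITION & SPEC =====
def Spec_pages_to_range_str (pages : List Int) (out : String) : Prop := out = pages_to_range_str_alt pages
instance (pages : List Int) (out : String) : Decidable (Spec_pages_to_range_str pages out) := by unfold Spec_pages_to_range_str; infer_instance

-- ===== CLAIM (what is proved, stated in full; the proofs are below) =====
def Claim_equal_pages_to_range_str : Prop := ∀ (pages : List Int), Dom_pages_to_range_str pages → Spec_pages_to_range_str pages (pages_to_range_str pages)

-- ===== LEMMAS AND PROOFS =====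

-- last-element helper: prepending a head does not change the defaulted last element (for nonempty tail the default is unused).
theorem getLast?_getD_cons (a b : Int) (l : List Int) :
    ((a :: l).getLast?.getD b) = l.getLast?.getD a := by
  cases l with
  | nil => simp
  | cons c t => rw [List.getLast?_eq_some_getLast (l := c :: t) (by simp)]; rfl

-- A's loop from state (s, e, r) equals r followed by B's rendering of the zipped
-- boundary lists computed over the remaining pages with current end e prepended.
theorem loopA_eq_boundaries (ps : List Int) (s e : Int) (r : List String) :
    pagesLoopA ps s e r = r ++
      (((s :: (((e :: ps).zip ps).filterMap fun qp => if qp.2 = qp.1 + 1 then none else some qp.2)).zip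
        ((((e :: ps).zip ps).filterMap fun qp => if qp.2 = qp.1 + 1 then none else some qp.1)
          ++ [List.getLastD ps e])).map pagesRenderB) := by
  induction ps generalizing s e r with
  | nil => simp [pagesLoopA, pagesRenderB]
  | cons p rest ih =>
      by_cases h : p = e + 1
      · subst h
        simpa [pagesLoopA, List.zip_cons_cons, List.filterMap_cons,
          List.getLastD_cons, getLast?_getD_cons] using ih s (e + 1) r
      · simp only [pagesLoopA, if_neg h, List.zip_cons_cons, List.filterMap_cons,
          List.getLastD_cons]
        rw [ih p p]
        simp [pagesRenderB, List.zip_cons_cons]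

-- ===== VERDICT (by name: the statement is the Claim_ definition above) =====
theorem pages_to_range_str_spec : Claim_equal_pages_to_range_str := by
  intro pages _
  unfold Spec_pages_to_range_str
  match pages with
  | [] => rfl
  | p0 :: rest =>
      simp only [pages_to_range_str, pages_to_range_str_alt, pagesStartsB, pagesEndsB]
      rw [loopA_eq_boundaries]
      simp
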